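-- pv_equiv track=rewrite | github.com/joe91e/test | test/app.py | parse_traceback
-- ===== SOURCE A (Python) =====
-- def parse_traceback(traceback_list):
--     parsed_output = []
--
--     another_exception_msg = 'During handling of the above exception, another exception occurred:'
--     new_exception_msg = 'Traceback (most recent call last):'
--     exception_location = 'File "/'
--     exception_separator = '-' * 80
--     message_separator = '=' * 80
--
--     cur_exception_info = ''
--
--     for traceback_line in traceback_list:
--         if another_exception_msg in traceback_line or new_exception_msg in traceback_line:
--             if cur_exception_info != '':
--                 parsed_output.append(cur_exception_info)
--                 parsed_output.append(exception_separator)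
--                 cur_exception_info = ''
--         elif exception_location in traceback_line:
--             cur_exception_info = traceback_line
--         else:
--             cur_exception_info += traceback_line
--
--     if cur_exception_info != '':
--         parsed_output.append(cur_exception_info)
--         parsed_output.insert(0, message_separator)
--         parsed_output.append(message_separator)
--
--     return parsed_output
-- ===== SOURCE B (Python) =====
-- def parse_traceback(traceback_list):
--     another_exception_msg = 'During handling of the above exception, another exception occurred:'
--     new_exception_msg = 'Traceback (most recent call last):'
--     exception_location = 'File "/'
--     exception_separator = '-' * 80
--     message_separator = '=' * 80
--
--     # Phase 1: split the lines into sections at marker lines.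
--     done_sections = []
--     current = []
--     for line in traceback_list:
--         if another_exception_msg in line or new_exception_msg in line:
--             done_sections.append(current)
--             current = []
--         else:
--             current.append(line)
--
--     # Phase 2: a section's info is the join of its suffix starting at the
--     # last location line (the whole section when there is none).
--     def section_info(section):
--         last = None
--         for j, line in enumerate(section):
--             if exception_location in line:
--                 last = j
--         return ''.join(section if last is None else section[last:])
--
--     # Phase 3: each completed section with nonempty info flushes with a dash
--     # separator; a nonempty final section wraps everything in '=' separators.
--     output = []
--     for section in done_sections:
--         info = section_info(section)
--         if info != '':
--             output.append(info)
--             output.append(exception_separator)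
--     final_info = section_info(current)
--     if final_info != '':
--         output = [message_separator] + output + [final_info, message_separator]
--     return output
-- ===== Notes on version B (the rewrite author's own statement) =====
-- stated objective: alternative
-- what changed: Replaces A's single stateful accumulator loop by a three-phase decomposition: split the lines into sections at marker lines, compute each section's info from its last location line (join of the suffix), then assemble the output with separators.
import Mathlib
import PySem

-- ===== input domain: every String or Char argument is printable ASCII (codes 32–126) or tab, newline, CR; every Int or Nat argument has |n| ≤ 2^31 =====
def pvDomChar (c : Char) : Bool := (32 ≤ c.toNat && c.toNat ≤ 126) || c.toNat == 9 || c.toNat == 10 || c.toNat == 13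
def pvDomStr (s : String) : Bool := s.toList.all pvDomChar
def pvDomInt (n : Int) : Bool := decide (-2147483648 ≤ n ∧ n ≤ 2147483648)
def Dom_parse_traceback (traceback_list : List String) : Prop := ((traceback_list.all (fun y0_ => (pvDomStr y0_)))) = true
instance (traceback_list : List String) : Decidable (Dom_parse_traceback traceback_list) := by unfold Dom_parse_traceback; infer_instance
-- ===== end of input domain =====

-- B replaces A's single stateful loop by a three-phase decomposition (split into
-- sections at marker lines, compute each sec's info from its last location
-- line, assemble); objective: alternative (same cost, clearer structure).

-- shared string constants of both Pythons
def pvAnother : String := "During handling of the above exception, another exception occurred:"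
def pvNewExc : String := "Traceback (most recent call last):"
def pvLoc : String := "File \"/"
def pvDash : String := "--------------------------------------------------------------------------------"
def pvMsgSep : String := "================================================================================"

-- ===== PORT A =====
-- loop body of A: markers flush a nonempty accumulator, a location line resets it, else append
def pvStepA (st : List String × String) (line : String) : List String × String :=
  if PySem.Str.isIn pvAnother line || PySem.Str.isIn pvNewExc line then
    (if st.2 ≠ "" then (st.1 ++ [st.2, pvDash], "") else st)
  else if PySem.Str.isIn pvLoc line then (st.1, line)
  else (st.1, st.2 ++ line)

def parse_traceback (traceback_list : List String) : List String :=
  let st := traceback_list.foldl pvStepA ([], "")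
  if st.2 ≠ "" then [pvMsgSep] ++ (st.1 ++ [st.2]) ++ [pvMsgSep] else st.1

-- ===== PORT B =====
-- phase 1 loop body: a marker line closes the current sec, else the line joins it
def pvStepB (p : List (List String) × List String) (line : String) :
    List (List String) × List String :=
  if PySem.Str.isIn pvAnother line || PySem.Str.isIn pvNewExc line then
    (p.1 ++ [p.2], [])
  else (p.1, p.2 ++ [line])

-- phase 2: index of the last location line (Source B's enumerate loop), then join of the suffix
def pvLastLoc (sec : List String) : Option Int :=
  (PySem.List.enumerate sec 0).foldl
    (fun last jl => if PySem.Str.isIn pvLoc jl.2 then some jl.1 else last) none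

def pvSectionInfo (sec : List String) : String :=
  match pvLastLoc sec with
  | none => PySem.Str.join "" sec
  | some j => PySem.Str.join "" (PySem.List.slice sec (some j) none)

-- phase 3 loop body: flush a completed sec with nonempty info
def pvFlushStep (out : List String) (sec : List String) : List String :=
  let info := pvSectionInfo sec
  if info ≠ "" then out ++ [info, pvDash] else out

def parse_traceback_alt (traceback_list : List String) : List String :=
  let p := traceback_list.foldl pvStepB ([], [])
  let out := p.1.foldl pvFlushStep []
  let final_info := pvSectionInfo p.2
  if final_info ≠ "" then [pvMsgSep] ++ out ++ [final_info, pvMsgSep] else out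

-- ===== PRECONDITION & SPEC =====
def Spec_parse_traceback (traceback_list : List String) (out : List String) : Prop := out = parse_traceback_alt traceback_list
instance (traceback_list : List String) (out : List String) : Decidable (Spec_parse_traceback traceback_list out) := by unfold Spec_parse_traceback; infer_instance

-- ===== CLAIM (what is proved, stated in full; the proofs are below) =====
def Claim_equal_parse_traceback : Prop := ∀ (traceback_list : List String), Dom_parse_traceback traceback_list → Spec_parse_traceback traceback_list (parse_traceback traceback_list)

-- ===== LEMMAS AND PROOFS =====

theorem pv_flat_int (xs : List (List Char)) :
    (List.intersperse ([] : List Char) xs).flatten = xs.flatten := by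
  induction xs with
  | nil => simp
  | cons a t ih => cases t <;> simp_all [List.intersperse]

theorem pv_join_snoc (xs : List String) (l : String) :
    PySem.Str.join "" (xs ++ [l]) = PySem.Str.join "" xs ++ l := by
  simp [PySem.Str.join, PySem.Chars.join, List.intercalate, pv_flat_int]

theorem pv_lastLoc_snoc (xs : List String) (l : String) :
    pvLastLoc (xs ++ [l]) =
      if PySem.Str.isIn pvLoc l then some (xs.length : Int) else pvLastLoc xs := by
  simp only [pvLastLoc, PySem.List.enumerate_append, List.foldl_append,
    PySem.List.enumerate_cons, PySem.List.enumerate_nil, List.foldl_cons, List.foldl_nil]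
  by_cases h : PySem.Str.isIn pvLoc l = true
  · rw [if_pos h, if_pos h]; simp
  · rw [if_neg h, if_neg h]

theorem pv_lastLoc_nat (xs : List String) :
    pvLastLoc xs = none ∨ ∃ k : Nat, pvLastLoc xs = some (k : Int) ∧ k < xs.length := by
  induction xs using List.reverseRecOn with
  | nil => left; rfl
  | append_singleton ys l ih =>
    rw [pv_lastLoc_snoc]
    by_cases h : PySem.Str.isIn pvLoc l = true
    · right
      refine ⟨ys.length, ?_, by simp⟩
      rw [if_pos h]
    · rw [if_neg h]
      rcases ih with h0 | ⟨k, hk, hlt⟩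
      · left; exact h0
      · right; exact ⟨k, hk, by simp; omega⟩

theorem pv_info_snoc (xs : List String) (l : String) :
    pvSectionInfo (xs ++ [l]) =
      if PySem.Str.isIn pvLoc l then l else pvSectionInfo xs ++ l := by
  by_cases h : PySem.Str.isIn pvLoc l = true
  · rw [if_pos h]
    simp only [pvSectionInfo, pv_lastLoc_snoc, if_pos h]
    rw [PySem.List.slice_from_natCast]
    simp [PySem.Str.join, PySem.Chars.join, List.intercalate]
  · rw [if_neg h]
    rcases pv_lastLoc_nat xs with h0 | ⟨k, hk, hlt⟩
    · simp only [pvSectionInfo, pv_lastLoc_snoc, if_neg h, h0]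
      exact pv_join_snoc xs l
    · simp only [pvSectionInfo, pv_lastLoc_snoc, if_neg h, hk]
      rw [PySem.List.slice_from_natCast, PySem.List.slice_from_natCast,
        List.drop_append_of_le_length (by omega)]
      exact pv_join_snoc _ l

theorem pv_info_nil : pvSectionInfo [] = "" := by rfl

-- loop invariant: A's running state is (flush of the completed sections, info of the open section)
theorem pv_main (lines : List String) :
    ∀ (done : List (List String)) (cur : List String),
      lines.foldl pvStepA (done.foldl pvFlushStep [], pvSectionInfo cur)
        = ((lines.foldl pvStepB (done, cur)).1.foldl pvFlushStep [],
           pvSectionInfo ((lines.foldl pvStepB (done, cur)).2)) := by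
  induction lines with
  | nil => intro done cur; rfl
  | cons l t ih =>
    intro done cur
    simp only [List.foldl_cons]
    by_cases hm : (PySem.Str.isIn pvAnother l || PySem.Str.isIn pvNewExc l) = true
    · have hB : pvStepB (done, cur) l = (done ++ [cur], []) := by
        simp only [pvStepB]; rw [if_pos hm]
      have hflush : (done ++ [cur]).foldl pvFlushStep []
          = pvFlushStep (done.foldl pvFlushStep []) cur := by
        rw [List.foldl_append]; rfl
      have hA : pvStepA (done.foldl pvFlushStep [], pvSectionInfo cur) l
          = ((done ++ [cur]).foldl pvFlushStep [], pvSectionInfo []) := by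
        simp only [pvStepA]; rw [if_pos hm, hflush]
        by_cases hc : pvSectionInfo cur = ""
        · rw [if_neg (not_not_intro hc)]
          simp [pvFlushStep, hc, pv_info_nil]
        · rw [if_pos hc]
          simp [pvFlushStep, hc, pv_info_nil]
      rw [hA, hB, ih]
    · have hB : pvStepB (done, cur) l = (done, cur ++ [l]) := by
        simp only [pvStepB]; rw [if_neg hm]
      have hA : pvStepA (done.foldl pvFlushStep [], pvSectionInfo cur) l
          = (done.foldl pvFlushStep [], pvSectionInfo (cur ++ [l])) := by
        simp only [pvStepA]; rw [if_neg hm, pv_info_snoc]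
        by_cases hl : PySem.Str.isIn pvLoc l = true
        · rw [if_pos hl, if_pos hl]
        · rw [if_neg hl, if_neg hl]
      rw [hA, hB, ih]

-- ===== VERDICT (by name: the statement is the Claim_ definition above) =====
theorem parse_traceback_spec : Claim_equal_parse_traceback := by
  intro tl _
  show parse_traceback tl = parse_traceback_alt tl
  unfold parse_traceback parse_traceback_alt
  have h0 : (([], "") : List String × String)
      = (([] : List (List String)).foldl pvFlushStep [], pvSectionInfo ([] : List String)) := rfl
  rw [h0, pv_main tl [] []]
  dsimp only
  split <;> simp
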